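-- pv_equiv track=rewrite | github.com/Aasthaengg/IBMdataset | Python_codes/p03436/s039475116.py | solve
-- ===== SOURCE A (Python) =====
-- from collections import deque
--
-- def solve(H, W, S):
--     n_cells = 0
--     for y in range(H):
--         for x in range(W):
--             if S[y][x] == ".":
--                 n_cells += 1
--     A = [[-1 for j in range(W)] for i in range(H)]
--     A[0][0] = 1
--     D = [(0, 1), (1, 0), (0, -1), (-1, 0)]
--     q = deque()
--     q.append((0, 0))
--     while q:
--         y, x = q.popleft()
--         for dy, dx in D:
--             ny, nx = y + dy, x + dx
--             if 0 <= ny < H and 0 <= nx < W and S[ny][nx] == "." and A[ny][nx] == -1: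
--                 A[ny][nx] = A[y][x] + 1
--                 q.append((ny, nx))
--     shortest = A[H-1][W-1]
--     return n_cells - shortest if shortest > 0 else -1
-- ===== SOURCE B (Python) =====
-- def solve(H, W, S):
--     n_cells = sum(row[:W].count(".") for row in S[:H])
--     INF = H * W + 2
--     dist = [[INF] * W for _ in range(H)]
--     dist[0][0] = 1
--     for _ in range(H * W):
--         new = [[dist[y][x] if S[y][x] != "." else
--                 min([dist[y][x]] + [dist[ny][nx] + 1
--                                     for ny, nx in ((y, x + 1), (y + 1, x), (y, x - 1), (y - 1, x))
--                                     if 0 <= ny < H and 0 <= nx < W])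
--                 for x in range(W)]
--                for y in range(H)]
--         if new == dist:
--             break
--         dist = new
--     d = dist[H - 1][W - 1]
--     return n_cells - d if d <= H * W + 1 else -1
-- ===== Notes on version B (the rewrite author's own statement) =====
-- stated objective: alternative
-- what changed: A's FIFO-queue BFS with a visited/distance matrix is replaced by synchronous Bellman-Ford relaxation: the whole grid of tentative distances (INF sentinel) is rebuilt each round from its four neighbours until a fixed point, with no queue or frontier bookkeeping; A's nested counting loops become a per-row slice-and-count sum.
import Mathlib
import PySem

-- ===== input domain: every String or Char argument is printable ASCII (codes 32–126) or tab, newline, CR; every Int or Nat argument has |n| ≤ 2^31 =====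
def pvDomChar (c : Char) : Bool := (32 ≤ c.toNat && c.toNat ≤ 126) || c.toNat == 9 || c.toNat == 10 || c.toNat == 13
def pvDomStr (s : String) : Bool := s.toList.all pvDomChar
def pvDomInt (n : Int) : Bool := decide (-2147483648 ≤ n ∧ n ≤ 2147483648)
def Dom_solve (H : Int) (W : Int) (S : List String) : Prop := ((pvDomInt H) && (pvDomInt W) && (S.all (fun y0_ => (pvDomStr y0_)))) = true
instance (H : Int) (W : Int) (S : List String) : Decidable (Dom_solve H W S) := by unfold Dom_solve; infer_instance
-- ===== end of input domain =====

-- B replaces A's FIFO-queue BFS by synchronous Bellman-Ford relaxation: the whole grid of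
-- tentative distances is relaxed simultaneously from its four neighbours until a fixed point
-- (objective: alternative algorithm, no queue/visited bookkeeping); A's nested counting loops
-- become a per-row slice-and-count sum. Return values agree on all inputs where A raises no
-- exception.

-- shared helpers: both Pythons test `S[ny][nx] == "."` and read/assign an H×W list-of-lists
-- grid the same way (all indices used are nonnegative, so `.toNat` indexing is exact there)
def cellOpen (S : List String) (y x : Int) : Bool :=
  ((PySem.List.pyGet? S y).bind (fun row => PySem.Str.pyGet? row x)) == some '.'

def mget (m : List (List Int)) (y x : Int) : Int :=
  (m.getD y.toNat []).getD x.toNat (-1)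

def mset (m : List (List Int)) (y x : Int) (v : Int) : List (List Int) :=
  m.set y.toNat ((m.getD y.toNat []).set x.toNat v)

-- ===== PORT A =====
-- D = [(0, 1), (1, 0), (0, -1), (-1, 0)]
def dirsA : List (Int × Int) := [(0, 1), (1, 0), (0, -1), (-1, 0)]

-- one popped cell: `for dy, dx in D: …` (state = (A, queue-after-pop); appends go to the queue)
def bfsStepA (H W : Int) (S : List String) (st : List (List Int) × List (Int × Int))
    (c : Int × Int) : List (List Int) × List (Int × Int) :=
  dirsA.foldl (fun st2 d =>
    let ny := c.1 + d.1
    let nx := c.2 + d.2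
    if (decide (0 ≤ ny) && decide (ny < H) && (decide (0 ≤ nx) && decide (nx < W))
        && cellOpen S ny nx && (mget st2.1 ny nx == -1)) then
      (mset st2.1 ny nx (mget st2.1 c.1 c.2 + 1), st2.2 ++ [(ny, nx)])
    else st2) st

-- `while q: y, x = q.popleft(); …` — fuel-bounded; the fuel passed in solve is shown
-- sufficient in the proofs below (each pop corresponds to a marked cell)
def bfsA (H W : Int) (S : List String) : Nat → List (List Int) → List (Int × Int) → List (List Int)
  | 0, mat, _ => mat
  | _ + 1, mat, [] => mat
  | f + 1, mat, c :: q =>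
      let st := bfsStepA H W S (mat, q) c
      bfsA H W S f st.1 st.2

def solve (H : Int) (W : Int) (S : List String) : Int :=
  let n_cells : Int := (PySem.List.pyRange 0 H 1).foldl (fun acc y =>
    (PySem.List.pyRange 0 W 1).foldl (fun acc2 x =>
      if cellOpen S y x then acc2 + 1 else acc2) acc) 0
  let A0 := (PySem.List.pyRange 0 H 1).map (fun _ =>
    (PySem.List.pyRange 0 W 1).map (fun _ => (-1 : Int)))
  let A1 := mset A0 0 0 1
  let AF := bfsA H W S (2 * (H.toNat * W.toNat) + 1) A1 [(0, 0)]
  let shortest := mget AF (H - 1) (W - 1)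
  if shortest > 0 then n_cells - shortest else -1

-- ===== PORT B =====
-- ((y, x+1), (y+1, x), (y, x-1), (y-1, x))
def neighborsB (c : Int × Int) : List (Int × Int) :=
  [(c.1, c.2 + 1), (c.1 + 1, c.2), (c.1, c.2 - 1), (c.1 - 1, c.2)]

-- `[dist[ny][nx] + 1 for ny, nx in … if 0 <= ny < H and 0 <= nx < W]`
def jNbrVals (H W : Int) (b : List (List Int)) (y x : Int) : List Int :=
  (neighborsB (y, x)).foldl (fun acc n =>
    if (decide (0 ≤ n.1) && decide (n.1 < H) && (decide (0 ≤ n.2) && decide (n.2 < W))) then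
      acc ++ [mget b n.1 n.2 + 1]
    else acc) []

-- `dist[y][x] if S[y][x] != "." else min([dist[y][x]] + …)`  (min of a nonempty list = fold of min)
def jRelax (H W : Int) (S : List String) (b : List (List Int)) (y x : Int) : Int :=
  if cellOpen S y x then (jNbrVals H W b y x).foldl min (mget b y x) else mget b y x

-- one synchronous relaxation sweep: the new grid is built from the old one
def jStep (H W : Int) (S : List String) (b : List (List Int)) : List (List Int) :=
  (PySem.List.pyRange 0 H 1).map (fun y =>
    (PySem.List.pyRange 0 W 1).map (fun x => jRelax H W S b y x))

-- `for _ in range(H*W): new = …; if new == dist: break; dist = new`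
def jLoop (H W : Int) (S : List String) : Nat → List (List Int) → List (List Int)
  | 0, b => b
  | f + 1, b =>
      let nb := jStep H W S b
      if nb == b then b else jLoop H W S f nb

def solve_alt (H : Int) (W : Int) (S : List String) : Int :=
  let n_cells : Int := ((PySem.List.slice S none (some H)).map (fun row =>
    ((PySem.Str.count (PySem.Str.slice row none (some W)) ".") : Int))).sum
  let dist0 := (PySem.List.pyRange 0 H 1).map (fun _ => List.replicate W.toNat (H * W + 2))
  let dist1 := mset dist0 0 0 1
  let dF := jLoop H W S (H * W).toNat dist1
  let d := mget dF (H - 1) (W - 1)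
  if d ≤ H * W + 1 then n_cells - d else -1

-- ===== PRECONDITION & SPEC =====
-- Pre_ is exactly the set of inputs on which the Python A raises no exception: it needs
-- H ≥ 1 and W ≥ 1 (it reads A[0][0] and A[H-1][W-1]), at least H rows, and the first H
-- rows at least W characters long (the counting loop reads S[y][x] for all y < H, x < W).
def Pre_solve (H : Int) (W : Int) (S : List String) : Prop :=
  1 ≤ H ∧ 1 ≤ W ∧ H ≤ (S.length : Int) ∧
    ∀ row ∈ S.take H.toNat, W ≤ (row.toList.length : Int)
instance (H : Int) (W : Int) (S : List String) : Decidable (Pre_solve H W S) := by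
  unfold Pre_solve; infer_instance

def pvWitness_solve : Int × Int × List String := (2, 3, ["..#", ".#.", "..."])

def Spec_solve (H : Int) (W : Int) (S : List String) (out : Int) : Prop := out = solve_alt H W S
instance (H : Int) (W : Int) (S : List String) (out : Int) : Decidable (Spec_solve H W S out) := by unfold Spec_solve; infer_instance

-- ===== CLAIM (what is proved, stated in full; the proofs are below) =====
def Claim_equal_solve : Prop := ∀ (H : Int) (W : Int) (S : List String), Dom_solve H W S → Pre_solve H W S → Spec_solve H W S (solve H W S)

-- ===== LEMMAS AND PROOFS =====

-- ---- proof device: A's queue BFS processed level by level (used only in proofs) ----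

def bfsStepB (H W : Int) (S : List String) (st : List (List Int) × List (Int × Int))
    (c : Int × Int) : List (List Int) × List (Int × Int) :=
  (neighborsB c).foldl (fun st2 n =>
    if (decide (0 ≤ n.1) && decide (n.1 < H) && (decide (0 ≤ n.2) && decide (n.2 < W))
        && cellOpen S n.1 n.2 && (mget st2.1 n.1 n.2 == -1)) then
      (mset st2.1 n.1 n.2 (mget st2.1 c.1 c.2 + 1), st2.2 ++ [n])
    else st2) st

def bfsB (H W : Int) (S : List String) : Nat → List (List Int) → List (Int × Int) → List (List Int)
  | 0, mat, _ => mat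
  | f + 1, mat, front =>
      if front.isEmpty then mat
      else
        let st := front.foldl (bfsStepB H W S) (mat, [])
        bfsB H W S f st.1 st.2

-- ---- generic facts about the grid representation ----

def dims (H W : Int) (m : List (List Int)) : Prop :=
  m.length = H.toNat ∧ ∀ row ∈ m, row.length = W.toNat

def goodCell (H W : Int) (m : List (List Int)) (c : Int × Int) : Prop :=
  0 ≤ c.1 ∧ c.1 < H ∧ 0 ≤ c.2 ∧ c.2 < W ∧ 1 ≤ mget m c.1 c.2

def countNeg (m : List (List Int)) : Nat :=
  (m.map (fun r => r.count (-1))).sum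

theorem getD_set_self {α : Type} (l : List α) (i : Nat) (v d : α) (h : i < l.length) :
    (l.set i v).getD i d = v := by
  simp [List.getD_eq_getElem?_getD, List.getElem?_set_self h]

theorem getD_set_ne {α : Type} (l : List α) (i j : Nat) (v d : α) (h : i ≠ j) :
    (l.set i v).getD j d = l.getD j d := by
  simp [List.getD_eq_getElem?_getD, List.getElem?_set_ne h]

theorem getD_mem {α : Type} (l : List α) (i : Nat) (d : α) (h : i < l.length) : l.getD i d ∈ l := by
  rw [List.getD_eq_getElem?_getD, List.getElem?_eq_getElem h]; exact List.getElem_mem h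

theorem mget_mset_self (m : List (List Int)) (y x v : Int)
    (hy : y.toNat < m.length) (hx : x.toNat < (m.getD y.toNat []).length) :
    mget (mset m y x v) y x = v := by
  unfold mget mset
  rw [getD_set_self _ _ _ _ hy, getD_set_self _ _ _ _ hx]

theorem mget_mset_ne (m : List (List Int)) (y x v a b : Int)
    (h : a.toNat ≠ y.toNat ∨ b.toNat ≠ x.toNat) :
    mget (mset m y x v) a b = mget m a b := by
  unfold mget mset
  rcases h with h | h
  · rw [getD_set_ne _ _ _ _ _ (fun e => h e.symm)]
  · by_cases hy : a.toNat = y.toNat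
    · rw [hy]
      by_cases hin : y.toNat < m.length
      · rw [getD_set_self _ _ _ _ hin, getD_set_ne _ _ _ _ _ (fun e => h e.symm)]
      · rw [List.set_eq_of_length_le (by omega)]
    · rw [getD_set_ne _ _ _ _ _ (fun e => hy e.symm)]

theorem dims_mset (H W : Int) (m : List (List Int)) (y x v : Int) (hd : dims H W m) :
    dims H W (mset m y x v) := by
  obtain ⟨h1, h2⟩ := hd
  by_cases hin : y.toNat < m.length
  · refine ⟨by simpa [mset] using h1, ?_⟩
    intro row hrow
    unfold mset at hrow
    rcases List.mem_or_eq_of_mem_set hrow with h | h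
    · exact h2 row h
    · subst h
      rw [List.length_set]
      exact h2 _ (getD_mem _ _ _ hin)
  · unfold mset
    rw [List.set_eq_of_length_le (by omega)]
    exact ⟨h1, h2⟩

theorem countNeg_set (m : List (List Int)) (i : Nat) (r : List Int) (hi : i < m.length) :
    countNeg (m.set i r) + (m.getD i []).count (-1) = countNeg m + r.count (-1) := by
  induction m generalizing i with
  | nil => simp at hi
  | cons hd tl ih =>
      cases i with
      | zero => simp [countNeg]; omega
      | succ j =>
          simp only [List.set_cons_succ, countNeg, List.map_cons, List.sum_cons, List.getD_cons_succ]
          have := ih j (by simpa using hi)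
          simp only [countNeg] at this
          omega

theorem countNeg_mset (m : List (List Int)) (y x v : Int)
    (hy : y.toNat < m.length) (hx : x.toNat < (m.getD y.toNat []).length)
    (hold : mget m y x = -1) (hv : v ≠ -1) :
    countNeg (mset m y x v) + 1 = countNeg m := by
  unfold mset
  have h1 := countNeg_set m y.toNat ((m.getD y.toNat []).set x.toNat v) hy
  have hget : (m.getD y.toNat [])[x.toNat] = -1 := by
    have := hold
    unfold mget at this
    rwa [List.getD_eq_getElem?_getD, List.getElem?_eq_getElem hx, Option.getD_some] at this
  have h2 : ((m.getD y.toNat []).set x.toNat v).count (-1)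
      = (m.getD y.toNat []).count (-1) - 1 := by
    rw [List.count_set hx, hget]
    simp [hv]
  have hpos : 1 ≤ (m.getD y.toNat []).count (-1) :=
    List.count_pos_iff.mpr (hget ▸ List.getElem_mem hx)
  omega

-- ---- the two step functions are the same function ----

theorem stepAB (H W : Int) (S : List String) (st : List (List Int) × List (Int × Int))
    (c : Int × Int) : bfsStepA H W S st c = bfsStepB H W S st c := by
  simp only [bfsStepA, bfsStepB, dirsA, neighborsB, List.foldl_cons, List.foldl_nil,
    add_zero, ← sub_eq_add_neg]

-- the body of bfsStepB as a fold over an arbitrary candidate list (proof device)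
def stepGo (H W : Int) (S : List String) (y x : Int) (ns : List (Int × Int))
    (st : List (List Int) × List (Int × Int)) : List (List Int) × List (Int × Int) :=
  ns.foldl (fun st2 n =>
    if (decide (0 ≤ n.1) && decide (n.1 < H) && (decide (0 ≤ n.2) && decide (n.2 < W))
        && cellOpen S n.1 n.2 && (mget st2.1 n.1 n.2 == -1)) then
      (mset st2.1 n.1 n.2 (mget st2.1 y x + 1), st2.2 ++ [n])
    else st2) st

theorem bfsStepB_eq_stepGo (H W : Int) (S : List String) (st : List (List Int) × List (Int × Int))
    (c : Int × Int) : bfsStepB H W S st c = stepGo H W S c.1 c.2 (neighborsB c) st := rfl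

theorem mget_toNat_congr (m : List (List Int)) (a b c d : Int)
    (h1 : a.toNat = c.toNat) (h2 : b.toNat = d.toNat) : mget m a b = mget m c d := by
  unfold mget; rw [h1, h2]

-- ---- accumulator lemmas: appended cells do not influence the rest of the fold ----

theorem stepGo_acc (H W : Int) (S : List String) (y x : Int) (ns : List (Int × Int))
    (m : List (List Int)) (acc : List (Int × Int)) :
    stepGo H W S y x ns (m, acc)
      = ((stepGo H W S y x ns (m, [])).1, acc ++ (stepGo H W S y x ns (m, [])).2) := by
  induction ns generalizing m acc with
  | nil => simp [stepGo]
  | cons n ns ih =>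
      simp only [stepGo, List.foldl_cons] at *
      by_cases hc : (decide (0 ≤ n.1) && decide (n.1 < H) && (decide (0 ≤ n.2) && decide (n.2 < W))
          && cellOpen S n.1 n.2 && (mget m n.1 n.2 == -1)) = true
      · simp only [hc, if_true, List.nil_append]
        rw [ih (mset m n.1 n.2 (mget m y x + 1)) (acc ++ [n]),
          ih (mset m n.1 n.2 (mget m y x + 1)) [n]]
        simp
      · simp only [Bool.not_eq_true] at hc
        simp only [hc, Bool.false_eq_true, if_false]
        exact ih m acc

theorem stepB_acc (H W : Int) (S : List String) (m : List (List Int))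
    (acc : List (Int × Int)) (c : Int × Int) :
    bfsStepB H W S (m, acc) c
      = ((bfsStepB H W S (m, []) c).1, acc ++ (bfsStepB H W S (m, []) c).2) := by
  rw [bfsStepB_eq_stepGo, bfsStepB_eq_stepGo, stepGo_acc]

theorem expand_acc (H W : Int) (S : List String) (F : List (Int × Int))
    (m : List (List Int)) (acc : List (Int × Int)) :
    F.foldl (bfsStepB H W S) (m, acc)
      = ((F.foldl (bfsStepB H W S) (m, [])).1, acc ++ (F.foldl (bfsStepB H W S) (m, [])).2) := by
  induction F generalizing m acc with
  | nil => simp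
  | cons c F ih =>
      simp only [List.foldl_cons]
      have hP := ih (bfsStepB H W S (m, []) c).1 (bfsStepB H W S (m, []) c).2
      rw [Prod.mk.eta] at hP
      rw [stepB_acc H W S m acc c, ih, hP]
      simp [List.append_assoc]

-- ---- invariant and measure through one popped cell ----

theorem stepGo_spec (H W : Int) (S : List String) (y x : Int) (ns : List (Int × Int))
    (m : List (List Int)) (acc : List (Int × Int))
    (hd : dims H W m) (hyx : 1 ≤ mget m y x)
    (hacc : ∀ a ∈ acc, goodCell H W m a) :
    dims H W (stepGo H W S y x ns (m, acc)).1 ∧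
    (∀ a b : Int, mget m a b ≠ -1 →
      mget (stepGo H W S y x ns (m, acc)).1 a b = mget m a b) ∧
    (∀ a ∈ (stepGo H W S y x ns (m, acc)).2, goodCell H W (stepGo H W S y x ns (m, acc)).1 a) ∧
    2 * countNeg (stepGo H W S y x ns (m, acc)).1 + (stepGo H W S y x ns (m, acc)).2.length
      ≤ 2 * countNeg m + acc.length := by
  induction ns generalizing m acc with
  | nil => exact ⟨hd, fun a b _ => rfl, hacc, le_refl _⟩
  | cons n ns ih =>
      simp only [stepGo, List.foldl_cons] at *
      by_cases hc : (decide (0 ≤ n.1) && decide (n.1 < H) && (decide (0 ≤ n.2) && decide (n.2 < W))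
          && cellOpen S n.1 n.2 && (mget m n.1 n.2 == -1)) = true
      · simp only [hc, if_true]
        simp only [Bool.and_eq_true, decide_eq_true_eq, beq_iff_eq] at hc
        obtain ⟨⟨⟨⟨hn1, hn1'⟩, hn2, hn2'⟩, _⟩, hneg⟩ := hc
        set v : Int := mget m y x + 1 with hv
        have hvne : v ≠ -1 := by omega
        set m1 := mset m n.1 n.2 v with hm1
        have hylt : n.1.toNat < m.length := by rw [hd.1]; omega
        have hrow : (m.getD n.1.toNat []).length = W.toNat := hd.2 _ (getD_mem _ _ _ hylt)
        have hxlt : n.2.toNat < (m.getD n.1.toNat []).length := by rw [hrow]; omega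
        have mono1 : ∀ a b : Int, mget m a b ≠ -1 → mget m1 a b = mget m a b := by
          intro a b hab
          by_cases he : a.toNat = n.1.toNat ∧ b.toNat = n.2.toNat
          · exact absurd (mget_toNat_congr m a b n.1 n.2 he.1 he.2 ▸ hneg) hab
          · exact mget_mset_ne m n.1 n.2 v a b (by tauto)
        have hd1 : dims H W m1 := dims_mset H W m n.1 n.2 v hd
        have hyx1 : 1 ≤ mget m1 y x := by rw [mono1 y x (by omega)]; exact hyx
        have hngood : goodCell H W m1 n := by
          refine ⟨hn1, hn1', hn2, hn2', ?_⟩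
          rw [hm1, mget_mset_self m n.1 n.2 v hylt hxlt]; omega
        have hacc1 : ∀ a ∈ acc ++ [n], goodCell H W m1 a := by
          intro a ha
          rcases List.mem_append.mp ha with ha | ha
          · obtain ⟨g1, g2, g3, g4, g5⟩ := hacc a ha
            exact ⟨g1, g2, g3, g4, by rw [mono1 a.1 a.2 (by omega)]; exact g5⟩
          · simp at ha; subst ha; exact hngood
        have hcnt : countNeg m1 + 1 = countNeg m :=
          countNeg_mset m n.1 n.2 v hylt hxlt hneg hvne
        obtain ⟨ihd, ihmono, ihgood, ihle⟩ := ih m1 (acc ++ [n]) hd1 hyx1 hacc1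
        refine ⟨ihd, ?_, ihgood, ?_⟩
        · intro a b hab
          rw [ihmono a b (by rw [mono1 a b hab]; exact hab), mono1 a b hab]
        · simp only [List.length_append, List.length_singleton] at ihle
          omega
      · simp only [Bool.not_eq_true] at hc
        simp only [hc, Bool.false_eq_true, if_false]
        exact ih m acc hd hyx hacc

theorem expand_spec (H W : Int) (S : List String) (F : List (Int × Int))
    (m : List (List Int)) (acc : List (Int × Int))
    (hd : dims H W m) (hF : ∀ c ∈ F, goodCell H W m c) (hacc : ∀ a ∈ acc, goodCell H W m a) :
    dims H W (F.foldl (bfsStepB H W S) (m, acc)).1 ∧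
    (∀ a ∈ (F.foldl (bfsStepB H W S) (m, acc)).2,
      goodCell H W (F.foldl (bfsStepB H W S) (m, acc)).1 a) ∧
    2 * countNeg (F.foldl (bfsStepB H W S) (m, acc)).1
        + (F.foldl (bfsStepB H W S) (m, acc)).2.length
      ≤ 2 * countNeg m + acc.length := by
  induction F generalizing m acc with
  | nil => exact ⟨hd, hacc, le_refl _⟩
  | cons c F ih =>
      simp only [List.foldl_cons]
      obtain ⟨g1, g2, g3, g4, g5⟩ := hF c List.mem_cons_self
      rw [bfsStepB_eq_stepGo]
      obtain ⟨sd, smono, sgood, sle⟩ :=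
        stepGo_spec H W S c.1 c.2 (neighborsB c) m acc hd g5 hacc
      set st := stepGo H W S c.1 c.2 (neighborsB c) (m, acc) with hst
      have hF' : ∀ c' ∈ F, goodCell H W st.1 c' := by
        intro c' hc'
        obtain ⟨h1, h2, h3, h4, h5⟩ := hF c' (List.mem_cons_of_mem _ hc')
        exact ⟨h1, h2, h3, h4, by rw [smono c'.1 c'.2 (by omega)]; exact h5⟩
      obtain ⟨ihd, ihgood, ihle⟩ := ih st.1 st.2 sd hF' sgood
      exact ⟨ihd, ihgood, le_trans ihle sle⟩

-- ---- the queue processed one-by-one equals the frontier processed in rounds ----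

theorem bfsA_nil (H W : Int) (S : List String) (f : Nat) (m : List (List Int)) :
    bfsA H W S f m [] = m := by cases f <;> rfl

theorem bfsB_nil (H W : Int) (S : List String) (f : Nat) (m : List (List Int)) :
    bfsB H W S f m [] = m := by cases f <;> rfl

theorem bfsA_chunk (H W : Int) (S : List String) (F R : List (Int × Int))
    (m : List (List Int)) (f : Nat) :
    bfsA H W S (F.length + f) m (F ++ R)
      = bfsA H W S f (F.foldl (bfsStepB H W S) (m, [])).1
          (R ++ (F.foldl (bfsStepB H W S) (m, [])).2) := by
  induction F generalizing R m with
  | nil => simp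
  | cons c F ih =>
      have hl : (c :: F).length + f = (F.length + f) + 1 := by simp; omega
      rw [hl]
      show bfsA H W S (F.length + f)
          (bfsStepA H W S (m, F ++ R) c).1 (bfsStepA H W S (m, F ++ R) c).2 = _
      rw [stepAB, stepB_acc]
      simp only [List.foldl_cons]
      rw [List.append_assoc]
      rw [ih (R ++ (bfsStepB H W S (m, []) c).2) (bfsStepB H W S (m, []) c).1]
      rw [expand_acc H W S F (bfsStepB H W S (m, []) c).1 (bfsStepB H W S (m, []) c).2]
      simp

theorem bfs_eq (H W : Int) (S : List String) :
    ∀ (n : Nat) (m : List (List Int)) (q : List (Int × Int)),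
      dims H W m → (∀ c ∈ q, goodCell H W m c) → 2 * countNeg m + q.length ≤ n →
      ∀ fA fB : Nat, n ≤ fA → n ≤ fB → bfsA H W S fA m q = bfsB H W S fB m q := by
  intro n
  induction n using Nat.strong_induction_on with
  | _ n ih =>
      intro m q hd hq hmu fA fB hfA hfB
      cases q with
      | nil => rw [bfsA_nil, bfsB_nil]
      | cons c q =>
          have hlen : 1 ≤ (c :: q).length := by simp
          obtain ⟨fB', rfl⟩ : ∃ k, fB = k + 1 := ⟨fB - 1, by omega⟩
          have hB : bfsB H W S (fB' + 1) m (c :: q)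
              = bfsB H W S fB' ((c :: q).foldl (bfsStepB H W S) (m, [])).1
                  ((c :: q).foldl (bfsStepB H W S) (m, [])).2 := by
            simp [bfsB]
          rw [hB]
          have hA : bfsA H W S fA m (c :: q)
              = bfsA H W S (fA - (c :: q).length) ((c :: q).foldl (bfsStepB H W S) (m, [])).1
                  ((c :: q).foldl (bfsStepB H W S) (m, [])).2 := by
            have heq : fA = (c :: q).length + (fA - (c :: q).length) := by
              simp at hmu ⊢; omega
            rw [heq]
            have := bfsA_chunk H W S (c :: q) [] m (fA - (c :: q).length)
            simpa using this
          rw [hA]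
          obtain ⟨ed, egood, ele⟩ := expand_spec H W S (c :: q) m [] hd hq (by simp)
          exact ih (n - (c :: q).length) (by omega) _ _ ed egood
            (by simp at ele hmu ⊢; omega) _ _ (by omega) (by omega)

-- ---- the initial matrices agree, and counting the -1 entries ----

theorem pyRange_map_const {α : Type} (n : Int) (a : α) :
    (PySem.List.pyRange 0 n 1).map (fun _ => a) = List.replicate n.toNat a := by
  rw [PySem.List.pyRange_one 0 n]
  simp [List.eq_replicate_iff]

theorem countNeg_replicate (h w : Nat) :
    countNeg (List.replicate h (List.replicate w (-1 : Int))) = h * w := by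
  induction h with
  | zero => simp [countNeg]
  | succ h ih =>
      simp only [List.replicate_succ, countNeg, List.map_cons, List.sum_cons] at *
      rw [ih, List.count_replicate]
      simp [Nat.succ_mul]
      omega

-- ---- counting the open cells ----

theorem chars_count_singleton (cs : List Char) : PySem.Chars.count cs ['.'] = cs.count '.' := by
  have go : ∀ (l : List Char) (fuel acc : Nat), l.length ≤ fuel →
      PySem.Chars.count.go ['.'] fuel l acc = acc + l.count '.' := by
    intro l
    induction l with
    | nil => intro fuel acc _; cases fuel <;> simp [PySem.Chars.count.go]
    | cons a l ih =>
        intro fuel acc hf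
        obtain ⟨f, rfl⟩ : ∃ k, fuel = k + 1 := ⟨fuel - 1, by simp at hf; omega⟩
        by_cases ha : a = '.'
        · subst ha
          have hpre : List.isPrefixOf ['.'] ('.' :: l) = true := by
            simp [List.isPrefixOf]
          simp only [PySem.Chars.count.go, hpre, if_true, List.length_cons,
            List.length_nil, List.drop_succ_cons, List.drop_zero]
          rw [ih f (acc + 1) (by simp at hf; omega)]
          simp
          omega
        · have hpre : List.isPrefixOf ['.'] (a :: l) = false := by
            simp [List.isPrefixOf]
            exact fun h => ha (by simpa using h.symm)
          simp only [PySem.Chars.count.go, hpre, Bool.false_eq_true, if_false]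
          rw [ih f acc (by simp at hf; omega)]
          simp [ha]
  simp only [PySem.Chars.count, List.isEmpty, Bool.false_eq_true, if_false]
  simpa using go cs cs.length 0 (le_refl _)

theorem countP_range_eq_count_take (cs : List Char) (w : Nat) (hw : w ≤ cs.length) :
    (List.range w).countP (fun j => cs[j]? == some '.') = (cs.take w).count '.' := by
  induction w with
  | zero => simp
  | succ w ih =>
      rw [List.range_succ, List.countP_append, List.take_succ, List.count_append,
        ih (by omega)]
      have hg : cs[w]? = some cs[w] := List.getElem?_eq_getElem (by omega)
      by_cases h : cs[w] = '.'
      · simp [hg, h]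
      · simp [hg, h]

theorem ncells_eq (H W : Int) (S : List String) (hH : 1 ≤ H) (hW : 1 ≤ W)
    (hlen : H ≤ (S.length : Int))
    (hrows : ∀ row ∈ S.take H.toNat, W ≤ (row.toList.length : Int)) :
    (PySem.List.pyRange 0 H 1).foldl (fun acc y =>
        (PySem.List.pyRange 0 W 1).foldl (fun acc2 x =>
          if cellOpen S y x then acc2 + 1 else acc2) acc) 0
      = ((PySem.List.slice S none (some H)).map (fun row =>
          ((PySem.Str.count (PySem.Str.slice row none (some W)) ".") : Int))).sum := by
  have hB : ∀ row : String, (PySem.Str.count (PySem.Str.slice row none (some W)) ".")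
      = (row.toList.take W.toNat).count '.' := by
    intro row
    rw [PySem.Str.count_eq, PySem.Str.toList_slice]
    have hdot : ".".toList = ['.'] := by decide
    rw [hdot, chars_count_singleton, PySem.Chars.slice_eq_listSlice,
      PySem.List.slice_to _ (by omega)]
  have hcongr := PySem.List.foldl_congr_mem (PySem.List.pyRange 0 H 1)
    (fun acc y => (PySem.List.pyRange 0 W 1).foldl (fun acc2 x =>
      if cellOpen S y x then acc2 + 1 else acc2) acc)
    (fun acc y => acc + ((PySem.List.pyRange 0 W 1).countP (fun x => cellOpen S y x) : Int))
    0 (fun acc y _ => PySem.List.foldl_if_add_one _ _ _)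
  rw [hcongr]
  rw [PySem.List.foldl_add, PySem.List.slice_to _ (by omega), zero_add,
    PySem.List.pyRange_one 0 H, List.map_map]
  simp only [sub_zero]
  apply congrArg List.sum
  apply List.ext_getElem
  · simp; omega
  · intro i h1 h2
    simp only [List.getElem_map, List.getElem_range, Function.comp_apply, List.getElem_take]
    have hiH : i < H.toNat := by simpa using h1
    have hi : i < S.length := by omega
    have hrow : W.toNat ≤ (S[i].toList).length := by
      have := hrows S[i] (by
        rw [List.mem_take_iff_getElem]
        exact ⟨i, by omega, by simp⟩)
      omega
    rw [hB S[i]]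
    have hcp : (PySem.List.pyRange 0 W 1).countP (fun x => cellOpen S (0 + (i : Int)) x)
        = (S[i].toList.take W.toNat).count '.' := by
      rw [PySem.List.pyRange_one 0 W]
      simp only [sub_zero, List.countP_map]
      rw [← countP_range_eq_count_take _ _ hrow]
      apply List.countP_congr
      intro j hj
      simp only [Function.comp_apply, zero_add, cellOpen]
      rw [PySem.List.pyGet?_natCast, List.getElem?_eq_getElem hi]
      simp only [Option.bind_some]
      rw [PySem.Str.pyGet?_natCast]
    rw [hcp]

-- ---- relating one BFS level to one synchronous relaxation sweep ----

def inb (H W : Int) (c : Int × Int) : Prop := 0 ≤ c.1 ∧ c.1 < H ∧ 0 ≤ c.2 ∧ c.2 < W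

def trv (H W : Int) (m : List (List Int)) (c : Int × Int) : Int :=
  if mget m c.1 c.2 = -1 then H * W + 2 else mget m c.1 c.2

theorem bguard_iff (H W : Int) (n : Int × Int) :
    ((decide (0 ≤ n.1) && decide (n.1 < H) && (decide (0 ≤ n.2) && decide (n.2 < W))) = true)
      ↔ inb H W n := by
  simp [inb, and_assoc]

theorem guard_iff (H W : Int) (S : List String) (m : List (List Int)) (n : Int × Int) :
    ((decide (0 ≤ n.1) && decide (n.1 < H) && (decide (0 ≤ n.2) && decide (n.2 < W))
        && cellOpen S n.1 n.2 && (mget m n.1 n.2 == -1)) = true)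
      ↔ (inb H W n ∧ cellOpen S n.1 n.2 = true ∧ mget m n.1 n.2 = -1) := by
  simp [inb, and_assoc]

theorem inb_ne_toNat (H W : Int) (c n : Int × Int) (hc : inb H W c) (hn : inb H W n)
    (hne : c ≠ n) : c.1.toNat ≠ n.1.toNat ∨ c.2.toNat ≠ n.2.toNat := by
  obtain ⟨a1, a2, a3, a4⟩ := hc
  obtain ⟨b1, b2, b3, b4⟩ := hn
  by_contra h
  push_neg at h
  exact hne (Prod.ext (by omega) (by omega))

theorem neighborsB_symm (c n : Int × Int) : n ∈ neighborsB c ↔ c ∈ neighborsB n := by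
  simp [neighborsB, Prod.ext_iff]
  omega

-- per-cell description of one whole BFS expansion step (stepGo over a candidate list)
theorem stepGo_char (H W : Int) (S : List String) (y x v : Int) (ns : List (Int × Int))
    (m : List (List Int)) (acc : List (Int × Int)) (hd : dims H W m)
    (hyx : inb H W (y, x)) (hv : mget m y x = v) (hv1 : 1 ≤ v) :
    (∀ c : Int × Int, inb H W c → mget (stepGo H W S y x ns (m, acc)).1 c.1 c.2 =
        (if mget m c.1 c.2 ≠ -1 then mget m c.1 c.2
         else if cellOpen S c.1 c.2 = true ∧ c ∈ ns then v + 1 else -1)) ∧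
    (∀ c : Int × Int, c ∈ (stepGo H W S y x ns (m, acc)).2 ↔
        c ∈ acc ∨ (inb H W c ∧ cellOpen S c.1 c.2 = true ∧ mget m c.1 c.2 = -1 ∧ c ∈ ns)) ∧
    dims H W (stepGo H W S y x ns (m, acc)).1 := by
  induction ns generalizing m acc with
  | nil =>
      refine ⟨?_, ?_, by simpa [stepGo] using hd⟩
      · intro c hc
        by_cases h : mget m c.1 c.2 = -1 <;> simp [stepGo, h]
      · intro c; simp [stepGo]
  | cons n ns ih =>
      simp only [stepGo, List.foldl_cons] at *
      by_cases hP : inb H W n ∧ cellOpen S n.1 n.2 = true ∧ mget m n.1 n.2 = -1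
      · obtain ⟨hinbn, hopn, hnegn⟩ := hP
        rw [if_pos ((guard_iff H W S m n).mpr ⟨hinbn, hopn, hnegn⟩)]
        have hsrc_ne : (y, x) ≠ n := by
          intro h
          rw [show y = n.1 from congrArg Prod.fst h, show x = n.2 from congrArg Prod.snd h,
            hnegn] at hv
          omega
        have hylt : n.1.toNat < m.length := by
          rw [hd.1]; obtain ⟨u1, u2, u3, u4⟩ := hinbn; omega
        have hxlt : n.2.toNat < (m.getD n.1.toNat []).length := by
          rw [hd.2 _ (getD_mem _ _ _ hylt)]; obtain ⟨u1, u2, u3, u4⟩ := hinbn; omega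
        rw [hv]
        have hd1 : dims H W (mset m n.1 n.2 (v + 1)) := dims_mset H W m n.1 n.2 (v + 1) hd
        have hm1n : mget (mset m n.1 n.2 (v + 1)) n.1 n.2 = v + 1 :=
          mget_mset_self m n.1 n.2 (v + 1) hylt hxlt
        have hm1ne : ∀ c : Int × Int, inb H W c → c ≠ n →
            mget (mset m n.1 n.2 (v + 1)) c.1 c.2 = mget m c.1 c.2 := by
          intro c hic hcn
          exact mget_mset_ne m n.1 n.2 (v + 1) c.1 c.2 (inb_ne_toNat H W c n hic hinbn hcn)
        have hv' : mget (mset m n.1 n.2 (v + 1)) y x = v := by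
          have := hm1ne (y, x) hyx hsrc_ne
          simpa [this] using hv
        obtain ⟨IH1, IH2, IH3⟩ := ih (mset m n.1 n.2 (v + 1)) (acc ++ [n]) hd1 hv'
        refine ⟨?_, ?_, IH3⟩
        · intro c hic
          rw [IH1 c hic]
          by_cases hcn : c = n
          · subst hcn
            have hne1 : mget (mset m c.1 c.2 (v + 1)) c.1 c.2 ≠ -1 := by rw [hm1n]; omega
            simp [hne1, hm1n, hnegn, hopn]
            intro h1 h2
            omega
          · rw [hm1ne c hic hcn]
            by_cases hmc : mget m c.1 c.2 = -1
            · simp [hmc, List.mem_cons, hcn]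
            · simp [hmc]
        · intro c
          rw [IH2 c]
          by_cases hic : inb H W c
          · by_cases hcn : c = n
            · subst hcn
              simp [hic, hopn, hnegn, List.mem_cons]
            · rw [hm1ne c hic hcn]
              simp only [List.mem_append, List.mem_cons, List.not_mem_nil, or_false]
              tauto
          · simp only [List.mem_append, List.mem_cons, List.not_mem_nil, or_false]
            constructor
            · rintro ((h | rfl) | h)
              · exact Or.inl h
              · exact absurd hinbn hic
              · exact absurd h.1 hic
            · rintro (h | h)
              · exact Or.inl (Or.inl h)
              · exact absurd h.1 hic
      · rw [if_neg (fun hb => hP ((guard_iff H W S m n).mp hb))]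
        obtain ⟨IH1, IH2, IH3⟩ := ih m acc hd hv
        refine ⟨?_, ?_, IH3⟩
        · intro c hic
          rw [IH1 c hic]
          by_cases hmc : mget m c.1 c.2 = -1
          · by_cases hcn : c = n
            · subst hcn
              have hnop : ¬ cellOpen S c.1 c.2 = true := fun hop => hP ⟨hic, hop, hmc⟩
              simp [hmc, hnop]
            · simp [hmc, List.mem_cons, hcn]
          · simp [hmc]
        · intro c
          rw [IH2 c]
          by_cases hic : inb H W c
          · by_cases hcn : c = n
            · subst hcn
              simp only [List.mem_cons]
              constructor
              · rintro (h | h)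
                · exact Or.inl h
                · exact Or.inr ⟨h.1, h.2.1, h.2.2.1, Or.inr h.2.2.2⟩
              · rintro (h | ⟨q1, q2, q3, (q4 | q4)⟩)
                · exact Or.inl h
                · exact absurd ⟨q1, q2, q3⟩ hP
                · exact Or.inr ⟨q1, q2, q3, q4⟩
            · simp only [List.mem_cons]
              constructor
              · rintro (h | h)
                · exact Or.inl h
                · exact Or.inr ⟨h.1, h.2.1, h.2.2.1, Or.inr h.2.2.2⟩
              · rintro (h | ⟨q1, q2, q3, (q4 | q4)⟩)
                · exact Or.inl h
                · exact absurd q4 hcn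
                · exact Or.inr ⟨q1, q2, q3, q4⟩
          · constructor
            · rintro (h | h)
              · exact Or.inl h
              · exact absurd h.1 hic
            · rintro (h | h)
              · exact Or.inl h
              · exact absurd h.1 hic

-- per-cell description of expanding a whole frontier whose cells all carry the value kk
theorem expand_char (H W : Int) (S : List String) (kk : Int) (hkk : 1 ≤ kk) :
    ∀ (F : List (Int × Int)) (m : List (List Int)) (acc : List (Int × Int)),
      dims H W m → (∀ c ∈ F, inb H W c ∧ mget m c.1 c.2 = kk) →
      (∀ c : Int × Int, inb H W c → mget (F.foldl (bfsStepB H W S) (m, acc)).1 c.1 c.2 =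
          (if mget m c.1 c.2 ≠ -1 then mget m c.1 c.2
           else if cellOpen S c.1 c.2 = true ∧ ∃ n ∈ F, c ∈ neighborsB n then kk + 1 else -1)) ∧
      (∀ c : Int × Int, c ∈ (F.foldl (bfsStepB H W S) (m, acc)).2 ↔
          c ∈ acc ∨ (inb H W c ∧ cellOpen S c.1 c.2 = true ∧ mget m c.1 c.2 = -1 ∧
            ∃ n ∈ F, c ∈ neighborsB n)) ∧
      dims H W (F.foldl (bfsStepB H W S) (m, acc)).1 := by
  intro F
  induction F with
  | nil =>
      intro m acc hd _
      refine ⟨?_, ?_, by simpa using hd⟩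
      · intro c hic
        by_cases h : mget m c.1 c.2 = -1 <;> simp [h]
      · intro c; simp
  | cons n0 F ih =>
      intro m acc hd hF
      obtain ⟨hn0i, hn0v⟩ := hF n0 List.mem_cons_self
      simp only [List.foldl_cons]
      rw [bfsStepB_eq_stepGo]
      have hyx : inb H W (n0.1, n0.2) := by simpa using hn0i
      obtain ⟨SG1, SG2, SG3⟩ :=
        stepGo_char H W S n0.1 n0.2 kk (neighborsB n0) m acc hd hyx hn0v hkk
      have hkne : kk + 1 ≠ -1 := by omega
      have hF' : ∀ c ∈ F, inb H W c ∧
          mget (stepGo H W S n0.1 n0.2 (neighborsB n0) (m, acc)).1 c.1 c.2 = kk := by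
        intro c hc
        obtain ⟨hci, hcv⟩ := hF c (List.mem_cons_of_mem _ hc)
        refine ⟨hci, ?_⟩
        rw [SG1 c hci]
        simp [hcv]
        omega
      obtain ⟨IH1, IH2, IH3⟩ := ih (stepGo H W S n0.1 n0.2 (neighborsB n0) (m, acc)).1
        (stepGo H W S n0.1 n0.2 (neighborsB n0) (m, acc)).2 SG3 hF'
      rw [Prod.mk.eta] at IH1 IH2 IH3
      refine ⟨?_, ?_, IH3⟩
      · intro c hic
        rw [IH1 c hic, SG1 c hic]
        simp only [List.exists_mem_cons_iff]
        by_cases hmc : mget m c.1 c.2 = -1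
        · by_cases hop : cellOpen S c.1 c.2 = true
          · by_cases hadj : c ∈ neighborsB n0
            · simp [hmc, hop, hadj, hkne]
            · by_cases hadjF : ∃ n ∈ F, c ∈ neighborsB n
              · simp [hmc, hop, hadj, hadjF, hkne]
              · simp [hmc, hop, hadj, hadjF]
          · simp [hmc, hop]
        · simp [hmc]
      · intro c
        rw [IH2 c, SG2 c]
        simp only [List.exists_mem_cons_iff]
        by_cases hic : inb H W c
        · have hst1c := SG1 c hic
          have hneg1 : mget (stepGo H W S n0.1 n0.2 (neighborsB n0) (m, acc)).1 c.1 c.2 = -1 ↔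
              (mget m c.1 c.2 = -1 ∧ ¬(cellOpen S c.1 c.2 = true ∧ c ∈ neighborsB n0)) := by
            rw [hst1c]
            by_cases hmc : mget m c.1 c.2 = -1
            · by_cases hq : cellOpen S c.1 c.2 = true ∧ c ∈ neighborsB n0
              · simp [hmc, hq]; omega
              · simp [hmc, hq]
            · simp [hmc]
          rw [hneg1]
          constructor
          · rintro ((h | ⟨q1, q2, q3, q4⟩) | ⟨p1, p2, ⟨p3, p4⟩, p5⟩)
            · exact Or.inl h
            · exact Or.inr ⟨q1, q2, q3, Or.inl q4⟩
            · exact Or.inr ⟨p1, p2, p3, Or.inr p5⟩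
          · rintro (h | ⟨q1, q2, q3, (q4 | q4)⟩)
            · exact Or.inl (Or.inl h)
            · exact Or.inl (Or.inr ⟨q1, q2, q3, q4⟩)
            · by_cases hadj : c ∈ neighborsB n0
              · exact Or.inl (Or.inr ⟨q1, q2, q3, hadj⟩)
              · exact Or.inr ⟨q1, q2, ⟨q3, fun hh => hadj hh.2⟩, q4⟩
        · constructor
          · rintro ((h | h) | h)
            · exact Or.inl h
            · exact absurd h.1 hic
            · exact absurd h.1 hic
          · rintro (h | h)
            · exact Or.inl (Or.inl h)
            · exact absurd h.1 hic

-- ---- fold-min facts and the B-side cell values ----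

theorem foldl_min_init_le (l : List Int) (a : Int) : l.foldl min a ≤ a := by
  induction l generalizing a with
  | nil => exact le_refl a
  | cons v l ih => exact le_trans (ih (min a v)) (min_le_left a v)

theorem foldl_min_le_mem (l : List Int) (a x : Int) (hx : x ∈ l) : l.foldl min a ≤ x := by
  induction l generalizing a with
  | nil => simp at hx
  | cons v l ih =>
      rcases List.mem_cons.mp hx with rfl | h
      · exact le_trans (foldl_min_init_le l (min a x)) (min_le_right a x)
      · exact ih (min a v) h

theorem le_foldl_min (l : List Int) (a x : Int) (ha : x ≤ a) (hl : ∀ v ∈ l, x ≤ v) :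
    x ≤ l.foldl min a := by
  induction l generalizing a with
  | nil => exact ha
  | cons v l ih =>
      exact ih (min a v) (le_min ha (hl v List.mem_cons_self))
        (fun w hw => hl w (List.mem_cons_of_mem _ hw))

theorem foldl_min_eq (l : List Int) (a x : Int) (ha : x ≤ a) (hl : ∀ v ∈ l, x ≤ v)
    (hmem : x = a ∨ x ∈ l) : l.foldl min a = x := by
  refine le_antisymm ?_ (le_foldl_min l a x ha hl)
  rcases hmem with rfl | h
  · exact foldl_min_init_le l x
  · exact foldl_min_le_mem l a x h

theorem jNbrVals_mem (H W : Int) (b : List (List Int)) (y x v : Int) :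
    v ∈ jNbrVals H W b y x ↔
      ∃ n ∈ neighborsB (y, x), inb H W n ∧ v = mget b n.1 n.2 + 1 := by
  unfold jNbrVals
  rw [PySem.List.foldl_append_if, List.nil_append, List.mem_map]
  constructor
  · rintro ⟨n, hn, rfl⟩
    rw [List.mem_filter] at hn
    exact ⟨n, hn.1, (bguard_iff H W n).mp hn.2, rfl⟩
  · rintro ⟨n, hn1, hn2, rfl⟩
    exact ⟨n, List.mem_filter.mpr ⟨hn1, (bguard_iff H W n).mpr hn2⟩, rfl⟩

theorem getD_map_range {α : Type} (nn : Nat) (g : Nat → α) (d : α) (i : Nat) (hi : i < nn) :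
    ((List.range nn).map g).getD i d = g i := by
  rw [List.getD_eq_getElem?_getD, List.getElem?_map]
  simp [List.getElem?_range, hi]

theorem mget_jStep (H W : Int) (S : List String) (b : List (List Int)) (c : Int × Int)
    (hc : inb H W c) : mget (jStep H W S b) c.1 c.2 = jRelax H W S b c.1 c.2 := by
  obtain ⟨h1, h2, h3, h4⟩ := hc
  have hy : c.1.toNat < H.toNat := by omega
  have hx : c.2.toNat < W.toNat := by omega
  unfold jStep mget
  rw [PySem.List.pyRange_one 0 H, PySem.List.pyRange_one 0 W]
  simp only [sub_zero, List.map_map]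
  rw [getD_map_range H.toNat _ [] c.1.toNat hy]
  simp only [Function.comp_apply]
  rw [getD_map_range W.toNat _ (-1) c.2.toNat hx]
  simp only [Function.comp_apply]
  rw [zero_add, zero_add, Int.toNat_of_nonneg h1, Int.toNat_of_nonneg h3]

theorem dims_jStep (H W : Int) (S : List String) (b : List (List Int)) :
    dims H W (jStep H W S b) := by
  constructor
  · simp [jStep, PySem.List.pyRange_one]
  · intro row hr
    unfold jStep at hr
    rw [List.mem_map] at hr
    obtain ⟨y, _, hy⟩ := hr
    rw [← hy]
    simp [PySem.List.pyRange_one]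

theorem mget_natCast (m : List (List Int)) (i j : Nat) (hi : i < m.length)
    (hj : j < m[i].length) : mget m (i : Int) (j : Int) = m[i][j] := by
  unfold mget
  rw [Int.toNat_natCast, Int.toNat_natCast]
  have h1 : m.getD i [] = m[i] := by
    rw [List.getD_eq_getElem?_getD, List.getElem?_eq_getElem hi, Option.getD_some]
  rw [h1, List.getD_eq_getElem?_getD, List.getElem?_eq_getElem hj, Option.getD_some]

theorem eq_of_mget (H W : Int) (hH : 0 ≤ H) (hW : 0 ≤ W) (p q : List (List Int))
    (hp : dims H W p) (hq : dims H W q)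
    (h : ∀ c : Int × Int, inb H W c → mget p c.1 c.2 = mget q c.1 c.2) : p = q := by
  apply List.ext_getElem (by rw [hp.1, hq.1])
  intro i h1 h2
  apply List.ext_getElem (by rw [hp.2 _ (List.getElem_mem h1), hq.2 _ (List.getElem_mem h2)])
  intro j j1 j2
  have hi : i < H.toNat := by rw [← hp.1]; exact h1
  have hj : j < W.toNat := by rw [← hp.2 _ (List.getElem_mem h1)]; exact j1
  have hic : inb H W ((i : Int), (j : Int)) := ⟨by omega, by omega, by omega, by omega⟩
  have hh := h ((i : Int), (j : Int)) hic
  rwa [mget_natCast p i j h1 j1, mget_natCast q i j h2 j2] at hh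

-- ---- the coupling invariant between the BFS state and the relaxation grid ----

def InvBF (H W : Int) (S : List String) (k : Nat) (m b : List (List Int))
    (F : List (Int × Int)) : Prop :=
  dims H W m ∧ dims H W b ∧
  (∀ c : Int × Int, inb H W c → mget b c.1 c.2 = trv H W m c) ∧
  (∀ c : Int × Int, inb H W c → mget m c.1 c.2 ≠ -1 →
      1 ≤ mget m c.1 c.2 ∧ mget m c.1 c.2 ≤ (k : Int) + 1 ∧
        (cellOpen S c.1 c.2 = true ∨ c = ((0 : Int), (0 : Int)))) ∧
  (∀ c : Int × Int, inb H W c → (c ∈ F ↔ mget m c.1 c.2 = (k : Int) + 1)) ∧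
  (∀ c ∈ F, inb H W c) ∧
  mget m 0 0 ≠ -1 ∧
  (∀ c n : Int × Int, inb H W c → inb H W n → n ∈ neighborsB c → cellOpen S c.1 c.2 = true →
      mget m c.1 c.2 = -1 → mget m n.1 n.2 ≠ -1 → mget m n.1 n.2 = (k : Int) + 1) ∧
  (∀ c n : Int × Int, inb H W c → inb H W n → n ∈ neighborsB c →
      mget m c.1 c.2 ≠ -1 → mget m n.1 n.2 ≠ -1 → mget m c.1 c.2 ≤ mget m n.1 n.2 + 1)

theorem round_inv (H W : Int) (S : List String) (k : Nat) (m b : List (List Int))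
    (F : List (Int × Int)) (hH : 1 ≤ H) (hW : 1 ≤ W) (hk : (k : Int) + 1 ≤ H * W)
    (hinv : InvBF H W S k m b F) :
    InvBF H W S (k + 1) (F.foldl (bfsStepB H W S) (m, [])).1 (jStep H W S b)
      (F.foldl (bfsStepB H W S) (m, [])).2 ∧
    ((F.foldl (bfsStepB H W S) (m, [])).2 = [] ↔ jStep H W S b = b) := by
  obtain ⟨hdm, hdb, htr, hbnd, hFiff, hFinb, h00, hclo, hlip⟩ := hinv
  have hkk1 : (1 : Int) ≤ (k : Int) + 1 := by omega
  have hF' : ∀ c ∈ F, inb H W c ∧ mget m c.1 c.2 = (k : Int) + 1 :=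
    fun c hc => ⟨hFinb c hc, (hFiff c (hFinb c hc)).mp hc⟩
  obtain ⟨E1, E2, E3⟩ := expand_char H W S ((k : Int) + 1) hkk1 F m [] hdm hF'
  have h00i : inb H W ((0 : Int), (0 : Int)) := ⟨le_refl 0, by omega, le_refl 0, by omega⟩
  -- three-way description of the BFS matrix after the sweep
  have hdesc : ∀ c : Int × Int, inb H W c →
      (mget m c.1 c.2 ≠ -1 ∧
        mget (F.foldl (bfsStepB H W S) (m, [])).1 c.1 c.2 = mget m c.1 c.2) ∨
      (mget m c.1 c.2 = -1 ∧ (cellOpen S c.1 c.2 = true ∧ ∃ n ∈ F, c ∈ neighborsB n) ∧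
        mget (F.foldl (bfsStepB H W S) (m, [])).1 c.1 c.2 = (k : Int) + 2) ∨
      (mget m c.1 c.2 = -1 ∧ ¬(cellOpen S c.1 c.2 = true ∧ ∃ n ∈ F, c ∈ neighborsB n) ∧
        mget (F.foldl (bfsStepB H W S) (m, [])).1 c.1 c.2 = -1) := by
    intro c hic
    by_cases hmc : mget m c.1 c.2 = -1
    · by_cases hq : cellOpen S c.1 c.2 = true ∧ ∃ n ∈ F, c ∈ neighborsB n
      · refine Or.inr (Or.inl ⟨hmc, hq, ?_⟩)
        rw [E1 c hic, if_neg (not_not_intro hmc), if_pos hq]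
        omega
      · exact Or.inr (Or.inr ⟨hmc, hq, by rw [E1 c hic, if_neg (not_not_intro hmc), if_neg hq]⟩)
    · exact Or.inl ⟨hmc, by rw [E1 c hic, if_pos hmc]⟩
  have hmem2 : ∀ c : Int × Int, c ∈ (F.foldl (bfsStepB H W S) (m, [])).2 ↔
      (inb H W c ∧ cellOpen S c.1 c.2 = true ∧ mget m c.1 c.2 = -1 ∧
        ∃ n ∈ F, c ∈ neighborsB n) := by
    intro c
    rw [E2 c]
    simp
  -- the value of every cell after one relaxation sweep equals the translated BFS value
  have hjs : ∀ c : Int × Int, inb H W c →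
      mget (jStep H W S b) c.1 c.2 = trv H W (F.foldl (bfsStepB H W S) (m, [])).1 c := by
    intro c hic
    rw [mget_jStep H W S b c hic]
    unfold jRelax
    have hvals : ∀ v ∈ jNbrVals H W b c.1 c.2,
        ∃ n : Int × Int, n ∈ neighborsB c ∧ inb H W n ∧ v = mget b n.1 n.2 + 1 := by
      intro v hv
      obtain ⟨n, hn1, hn2, hn3⟩ := (jNbrVals_mem H W b c.1 c.2 v).mp hv
      rw [Prod.mk.eta] at hn1
      exact ⟨n, hn1, hn2, hn3⟩
    by_cases hop : cellOpen S c.1 c.2 = true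
    · rw [if_pos hop]
      rcases hdesc c hic with ⟨hmc, hval⟩ | ⟨hmc, ⟨_, hadj⟩, hval⟩ | ⟨hmc, hq, hval⟩
      · -- already reached: the sweep keeps its value
        unfold trv
        rw [hval, if_neg hmc]
        have hbc : mget b c.1 c.2 = mget m c.1 c.2 := by
          rw [htr c hic]; unfold trv; rw [if_neg hmc]
        rw [hbc]
        obtain ⟨hb1, hb2, _⟩ := hbnd c hic hmc
        refine foldl_min_eq _ _ _ (le_refl _) ?_ (Or.inl rfl)
        intro v hv
        obtain ⟨n, hnnb, hninb, rfl⟩ := hvals v hv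
        by_cases hmn : mget m n.1 n.2 = -1
        · rw [htr n hninb]; unfold trv; rw [if_pos hmn]; omega
        · rw [htr n hninb]; unfold trv; rw [if_neg hmn]
          have := hlip c n hic hninb hnnb hmc hmn
          omega
      · -- newly reached this round: the sweep computes k+2
        unfold trv
        rw [hval, if_neg (by omega)]
        have hbc : mget b c.1 c.2 = H * W + 2 := by
          rw [htr c hic]; unfold trv; rw [if_pos hmc]
        rw [hbc]
        refine foldl_min_eq _ _ ((k : Int) + 2) (by omega) ?_ ?_
        · intro v hv
          obtain ⟨n, hnnb, hninb, rfl⟩ := hvals v hv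
          by_cases hmn : mget m n.1 n.2 = -1
          · rw [htr n hninb]; unfold trv; rw [if_pos hmn]; omega
          · have := hclo c n hic hninb hnnb hop hmc hmn
            rw [htr n hninb]; unfold trv; rw [if_neg hmn, this]
            omega
        · right
          obtain ⟨n, hnF, hcn⟩ := hadj
          have hninb := hFinb n hnF
          have hnnb : n ∈ neighborsB c := (neighborsB_symm c n).mpr hcn
          have hnv : mget b n.1 n.2 = (k : Int) + 1 := by
            rw [htr n hninb]; unfold trv
            rw [if_neg (by rw [(hF' n hnF).2]; omega), (hF' n hnF).2]
          rw [jNbrVals_mem, Prod.mk.eta]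
          exact ⟨n, hnnb, hninb, by rw [hnv]; ring⟩
      · -- not reached: every useful neighbour is still at infinity
        unfold trv
        rw [hval, if_pos rfl]
        have hbc : mget b c.1 c.2 = H * W + 2 := by
          rw [htr c hic]; unfold trv; rw [if_pos hmc]
        rw [hbc]
        refine foldl_min_eq _ _ _ (le_refl _) ?_ (Or.inl rfl)
        intro v hv
        obtain ⟨n, hnnb, hninb, rfl⟩ := hvals v hv
        by_cases hmn : mget m n.1 n.2 = -1
        · rw [htr n hninb]; unfold trv; rw [if_pos hmn]; omega
        · exfalso
          have hnv := hclo c n hic hninb hnnb hop hmc hmn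
          have hnF : n ∈ F := (hFiff n hninb).mpr hnv
          exact hq ⟨hop, n, hnF, (neighborsB_symm c n).mp hnnb⟩
    · rw [if_neg hop]
      have hval : mget (F.foldl (bfsStepB H W S) (m, [])).1 c.1 c.2 = mget m c.1 c.2 := by
        rcases hdesc c hic with ⟨_, h⟩ | ⟨_, ⟨hq, _⟩, _⟩ | ⟨hmc, _, h⟩
        · exact h
        · exact absurd hq hop
        · rw [h, hmc]
      rw [htr c hic]
      unfold trv
      rw [hval]
  have hkc : ((k + 1 : Nat) : Int) + 1 = (k : Int) + 2 := by push_cast; ring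
  refine ⟨⟨E3, dims_jStep H W S b, hjs, ?_, ?_, ?_, ?_, ?_, ?_⟩, ?_, ?_⟩
  · -- value bounds and openness
    intro c hic hm'
    rcases hdesc c hic with ⟨hmc, hval⟩ | ⟨hmc, ⟨hq1, _⟩, hval⟩ | ⟨_, _, hval⟩
    · rw [hval]
      obtain ⟨x1, x2, x3⟩ := hbnd c hic hmc
      exact ⟨x1, by omega, x3⟩
    · rw [hval, hkc]
      exact ⟨by omega, by omega, Or.inl hq1⟩
    · rw [hval] at hm'; exact absurd rfl hm'
  · -- new frontier = cells at value k+2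
    intro c hic
    rw [hmem2 c, hkc]
    constructor
    · rintro ⟨_, hop, hmc, hadj⟩
      rcases hdesc c hic with ⟨h, _⟩ | ⟨_, _, hval⟩ | ⟨_, hq, _⟩
      · exact absurd hmc h
      · exact hval
      · exact absurd ⟨hop, hadj⟩ hq
    · intro hv
      rcases hdesc c hic with ⟨hmc, hval⟩ | ⟨hmc, ⟨hq1, hq2⟩, hval⟩ | ⟨_, _, hval⟩
      · exfalso
        rw [hval] at hv
        have := (hbnd c hic hmc).2.1
        omega
      · exact ⟨hic, hq1, hmc, hq2⟩
      · rw [hval] at hv; exfalso; omega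
  · -- new frontier cells are in bounds
    intro c hc
    exact ((hmem2 c).mp hc).1
  · -- the start cell stays reached
    rcases hdesc ((0 : Int), (0 : Int)) h00i with ⟨_, hval⟩ | ⟨hmc, _, _⟩ | ⟨hmc, _, _⟩
    · intro hcon
      rw [show mget (F.foldl (bfsStepB H W S) (m, [])).1 0 0
          = mget (F.foldl (bfsStepB H W S) (m, [])).1
              ((0 : Int), (0 : Int)).1 ((0 : Int), (0 : Int)).2 from rfl, hval] at hcon
      exact h00 hcon
    · exact absurd hmc h00
    · exact absurd hmc h00
  · -- closure at level k+1
    intro c n hic hin hnb hop hmc' hmn'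
    rcases hdesc c hic with ⟨hmc, hval⟩ | ⟨_, _, hval⟩ | ⟨hmc, hq, _⟩
    · exfalso; rw [hval] at hmc'; exact hmc hmc'
    · exfalso; rw [hval] at hmc'; omega
    · rcases hdesc n hin with ⟨hmn, hvaln⟩ | ⟨_, _, hvaln⟩ | ⟨_, _, hvaln⟩
      · exfalso
        have hnv := hclo c n hic hin hnb hop hmc hmn
        have hnF : n ∈ F := (hFiff n hin).mpr hnv
        exact hq ⟨hop, n, hnF, (neighborsB_symm c n).mp hnb⟩
      · rw [hvaln, hkc]
      · exact absurd hvaln hmn'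
  · -- Lipschitz at level k+1
    intro c n hic hin hnb hmc' hmn'
    rcases hdesc c hic with ⟨hmc, hval⟩ | ⟨hmc, ⟨hq1, _⟩, hval⟩ | ⟨_, _, hval⟩
    · rcases hdesc n hin with ⟨hmn, hvaln⟩ | ⟨hmn, _, hvaln⟩ | ⟨_, _, hvaln⟩
      · rw [hval, hvaln]; exact hlip c n hic hin hnb hmc hmn
      · rw [hval, hvaln]
        have := (hbnd c hic hmc).2.1
        omega
      · exact absurd hvaln hmn'
    · rcases hdesc n hin with ⟨hmn, hvaln⟩ | ⟨hmn, _, hvaln⟩ | ⟨_, _, hvaln⟩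
      · have hnv := hclo c n hic hin hnb hq1 hmc hmn
        rw [hval, hvaln, hnv]
        omega
      · rw [hval, hvaln]; omega
      · exact absurd hvaln hmn'
    · exact absurd hval hmc'
  · -- empty new frontier means the sweep is a fixed point
    intro hemp
    refine eq_of_mget H W (by omega) (by omega) _ _ (dims_jStep H W S b) hdb ?_
    intro c hic
    rw [hjs c hic, htr c hic]
    rcases hdesc c hic with ⟨hmc, hval⟩ | ⟨hmc, ⟨hq1, hq2⟩, _⟩ | ⟨hmc, _, hval⟩
    · unfold trv; rw [hval]
    · exfalso
      have : c ∈ (F.foldl (bfsStepB H W S) (m, [])).2 := (hmem2 c).mpr ⟨hic, hq1, hmc, hq2⟩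
      rw [hemp] at this
      exact List.not_mem_nil this
    · unfold trv; rw [hval, hmc]
  · -- a fixed point forces the new frontier to be empty
    intro hfix
    by_contra hne
    obtain ⟨c, hc⟩ := List.exists_mem_of_ne_nil _ hne
    obtain ⟨hic, hop, hmc, hadj⟩ := (hmem2 c).mp hc
    have h1 := hjs c hic
    rw [hfix, htr c hic] at h1
    rcases hdesc c hic with ⟨h, _⟩ | ⟨_, _, hval⟩ | ⟨_, hq, _⟩
    · exact h hmc
    · unfold trv at h1
      rw [hval, if_pos hmc, if_neg (show ¬((k : Int) + 2 = -1) by omega)] at h1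
      omega
    · exact hq ⟨hop, hadj⟩

-- ---- running the whole loop on both sides ----

def MatchRel (H W : Int) (mF bF : List (List Int)) : Prop :=
  ∀ c : Int × Int, inb H W c →
    (mget mF c.1 c.2 = -1 → mget bF c.1 c.2 = H * W + 2) ∧
    (mget mF c.1 c.2 ≠ -1 → mget bF c.1 c.2 = mget mF c.1 c.2 ∧
      1 ≤ mget mF c.1 c.2 ∧ mget mF c.1 c.2 ≤ H * W + 1)

theorem jLoop_succ_eq (H W : Int) (S : List String) (j : Nat) (b : List (List Int))
    (h : jStep H W S b = b) : jLoop H W S (j + 1) b = b := by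
  simp [jLoop, h]

theorem jLoop_succ_ne (H W : Int) (S : List String) (j : Nat) (b : List (List Int))
    (h : ¬ jStep H W S b = b) : jLoop H W S (j + 1) b = jLoop H W S j (jStep H W S b) := by
  simp [jLoop, h]

theorem match_run (H W : Int) (S : List String) (hH : 1 ≤ H) (hW : 1 ≤ W) :
    ∀ (j k : Nat) (m b : List (List Int)) (F : List (Int × Int)) (f : Nat),
      InvBF H W S k m b F → countNeg m + 1 ≤ j → k + j ≤ H.toNat * W.toNat → j ≤ f →
      MatchRel H W (bfsB H W S f m F) (jLoop H W S j b) := by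
  intro j
  induction j with
  | zero => intro k m b F f _ hcnt _ _; omega
  | succ j ih =>
      intro k m b F f hinv hcnt hkj hf
      obtain ⟨f', rfl⟩ : ∃ f', f = f' + 1 := ⟨f - 1, by omega⟩
      have hHWc : ((H.toNat * W.toNat : Nat) : Int) = H * W := by
        push_cast
        rw [Int.toNat_of_nonneg (by omega), Int.toNat_of_nonneg (by omega)]
      have hk : (k : Int) + 1 ≤ H * W := by
        have : ((k : Int)) + ((j : Int) + 1) ≤ ((H.toNat * W.toNat : Nat) : Int) := by
          exact_mod_cast hkj
        omega
      have hround := round_inv H W S k m b F hH hW hk hinv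
      obtain ⟨hdm, hdb, htr, hbnd, hFiff, hFinb, h00, hclo, hlip⟩ := hinv
      cases F with
      | nil =>
          rw [bfsB_nil]
          have hfix : jStep H W S b = b := (hround.2).mp rfl
          rw [jLoop_succ_eq H W S j b hfix]
          intro c hic
          constructor
          · intro hm
            rw [htr c hic]; unfold trv; rw [if_pos hm]
          · intro hm
            obtain ⟨x1, x2, _⟩ := hbnd c hic hm
            refine ⟨by rw [htr c hic]; unfold trv; rw [if_neg hm], x1, by omega⟩
      | cons c0 F0 =>
          have hbfs : bfsB H W S (f' + 1) m (c0 :: F0)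
              = bfsB H W S f' ((c0 :: F0).foldl (bfsStepB H W S) (m, [])).1
                  ((c0 :: F0).foldl (bfsStepB H W S) (m, [])).2 := by
            simp [bfsB]
          rw [hbfs]
          by_cases hfix : jStep H W S b = b
          · have hst2 : ((c0 :: F0).foldl (bfsStepB H W S) (m, [])).2 = [] :=
              (hround.2).mpr hfix
            rw [hst2, bfsB_nil, jLoop_succ_eq H W S j b hfix]
            obtain ⟨_, _, htr', hbnd', _, _, _, _, _⟩ := hround.1
            intro c hic
            constructor
            · intro hm
              have := htr' c hic
              rw [hfix] at this
              rw [this]; unfold trv; rw [if_pos hm]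
            · intro hm
              obtain ⟨x1, x2, _⟩ := hbnd' c hic hm
              refine ⟨?_, x1, by push_cast at x2; omega⟩
              have := htr' c hic
              rw [hfix] at this
              rw [this]; unfold trv; rw [if_neg hm]
          · have hst2 : ((c0 :: F0).foldl (bfsStepB H W S) (m, [])).2 ≠ [] :=
              fun h => hfix ((hround.2).mp h)
            rw [jLoop_succ_ne H W S j b hfix]
            have hgood : ∀ c ∈ (c0 :: F0), goodCell H W m c := by
              intro c hc
              obtain ⟨g1, g2, g3, g4⟩ := hFinb c hc
              have hv := (hFiff c (hFinb c hc)).mp hc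
              exact ⟨g1, g2, g3, g4, by rw [hv]; omega⟩
            obtain ⟨_, _, hle⟩ := expand_spec H W S (c0 :: F0) m [] hdm hgood (by simp)
            have hlen : 1 ≤ ((c0 :: F0).foldl (bfsStepB H W S) (m, [])).2.length := by
              have := hst2
              cases hget : ((c0 :: F0).foldl (bfsStepB H W S) (m, [])).2 with
              | nil => exact absurd hget hst2
              | cons a l => simp
            have hcnt' : countNeg ((c0 :: F0).foldl (bfsStepB H W S) (m, [])).1 + 1 ≤ j := by
              simp only [List.length_nil] at hle
              omega
            exact ih (k + 1) _ (jStep H W S b) _ f' hround.1 hcnt' (by omega) (by omega)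

-- ---- the initial states ----

theorem mget_replicate (H W a : Int) (c : Int × Int) (hc : inb H W c) :
    mget (List.replicate H.toNat (List.replicate W.toNat a)) c.1 c.2 = a := by
  obtain ⟨h1, h2, h3, h4⟩ := hc
  unfold mget
  have hrow : (List.replicate H.toNat (List.replicate W.toNat a)).getD c.1.toNat []
      = List.replicate W.toNat a := by
    rw [List.getD_eq_getElem?_getD, List.getElem?_replicate, if_pos (by omega), Option.getD_some]
  rw [hrow, List.getD_eq_getElem?_getD, List.getElem?_replicate, if_pos (by omega),
    Option.getD_some]

theorem mget_init (H W : Int) (hH : 1 ≤ H) (hW : 1 ≤ W) (a v : Int) (c : Int × Int)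
    (hc : inb H W c) :
    mget (mset (List.replicate H.toNat (List.replicate W.toNat a)) 0 0 v) c.1 c.2
      = if c = ((0 : Int), (0 : Int)) then v else a := by
  have hylt : (0 : Int).toNat < (List.replicate H.toNat (List.replicate W.toNat a)).length := by
    simp; omega
  have hrow0 : (List.replicate H.toNat (List.replicate W.toNat a)).getD (0 : Int).toNat []
      = List.replicate W.toNat a := by
    rw [List.getD_eq_getElem?_getD, List.getElem?_replicate, if_pos (by omega)]
    rfl
  by_cases h0 : c = ((0 : Int), (0 : Int))
  · rw [if_pos h0, h0]
    exact mget_mset_self _ 0 0 v hylt (by rw [hrow0]; simp; omega)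
  · rw [if_neg h0]
    have hne := inb_ne_toNat H W c ((0 : Int), (0 : Int)) hc
      ⟨le_refl 0, by omega, le_refl 0, by omega⟩ h0
    rw [mget_mset_ne _ 0 0 v c.1 c.2 (by simpa using hne)]
    exact mget_replicate H W a c hc

theorem InvBF_init (H W : Int) (S : List String) (hH : 1 ≤ H) (hW : 1 ≤ W) :
    InvBF H W S 0 (mset (List.replicate H.toNat (List.replicate W.toNat (-1 : Int))) 0 0 1)
      (mset (List.replicate H.toNat (List.replicate W.toNat (H * W + 2 : Int))) 0 0 1)
      [((0 : Int), (0 : Int))] := by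
  have hmc := fun c hc => mget_init H W hH hW (-1) 1 c hc
  have hbc := fun c hc => mget_init H W hH hW (H * W + 2) 1 c hc
  have h00i : inb H W ((0 : Int), (0 : Int)) := ⟨le_refl 0, by omega, le_refl 0, by omega⟩
  have hdrep : ∀ a : Int, dims H W (List.replicate H.toNat (List.replicate W.toNat a)) := by
    intro a
    exact ⟨by simp, by intro r hr; rw [List.eq_of_mem_replicate hr]; simp⟩
  refine ⟨dims_mset _ _ _ _ _ _ (hdrep _), dims_mset _ _ _ _ _ _ (hdrep _),
    ?_, ?_, ?_, ?_, ?_, ?_, ?_⟩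
  · intro c hic
    rw [hbc c hic]
    unfold trv
    rw [hmc c hic]
    by_cases h0 : c = ((0 : Int), (0 : Int))
    · simp [h0]
    · simp [h0]
  · intro c hic hne
    rw [hmc c hic] at hne ⊢
    by_cases h0 : c = ((0 : Int), (0 : Int))
    · rw [if_pos h0]
      exact ⟨le_refl 1, by simp, Or.inr h0⟩
    · rw [if_neg h0] at hne
      exact absurd rfl hne
  · intro c hic
    rw [hmc c hic]
    constructor
    · intro hcF
      simp only [List.mem_singleton] at hcF
      rw [if_pos hcF]
      simp
    · intro hv
      by_cases h0 : c = ((0 : Int), (0 : Int))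
      · simp [h0]
      · rw [if_neg h0] at hv
        exfalso
        simp at hv
  · intro c hc
    simp only [List.mem_singleton] at hc
    rw [hc]
    exact h00i
  · have h := hmc ((0 : Int), (0 : Int)) h00i
    simp at h
    omega
  · intro c n hic hin hnb hop hmcv hmnv
    rw [hmc n hin] at hmnv ⊢
    by_cases h0 : n = ((0 : Int), (0 : Int))
    · rw [if_pos h0]; simp
    · rw [if_neg h0] at hmnv
      exact absurd rfl hmnv
  · intro c n hic hin hnb hmcv hmnv
    rw [hmc c hic] at hmcv ⊢
    rw [hmc n hin] at hmnv ⊢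
    by_cases hc0 : c = ((0 : Int), (0 : Int))
    · by_cases hn0 : n = ((0 : Int), (0 : Int))
      · exfalso
        rw [hc0, hn0] at hnb
        simp [neighborsB, Prod.ext_iff] at hnb
      · rw [if_neg hn0] at hmnv
        exact absurd rfl hmnv
    · rw [if_neg hc0] at hmcv
      exact absurd rfl hmcv

-- ===== VERDICT (by name: the statement is the Claim_ definition above) =====
theorem solve_spec : Claim_equal_solve := by
  intro H W S hdom hpre
  obtain ⟨hH, hW, hlen, hrows⟩ := hpre
  have h0H : (0 : Int).toNat < H.toNat := by omega
  have h0W : (0 : Int).toNat < W.toNat := by omega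
  have hylt : (0 : Int).toNat
      < (List.replicate H.toNat (List.replicate W.toNat (-1 : Int))).length := by
    simpa using h0H
  have hrow0 : (List.replicate H.toNat (List.replicate W.toNat (-1 : Int))).getD
      (0 : Int).toNat [] = List.replicate W.toNat (-1 : Int) := by
    rw [List.getD_eq_getElem?_getD, List.getElem?_replicate, if_pos h0H]
    rfl
  have hxlt : (0 : Int).toNat
      < ((List.replicate H.toNat (List.replicate W.toNat (-1 : Int))).getD
          (0 : Int).toNat []).length := by
    rw [hrow0]; simpa using h0W
  have hd1 : dims H W (mset (List.replicate H.toNat (List.replicate W.toNat (-1 : Int))) 0 0 1) := by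
    apply dims_mset
    constructor
    · simp
    · intro row hr
      rw [List.eq_of_mem_replicate hr]
      simp
  have hgood : ∀ c ∈ [((0 : Int), (0 : Int))],
      goodCell H W (mset (List.replicate H.toNat (List.replicate W.toNat (-1 : Int))) 0 0 1) c := by
    intro c hc
    simp only [List.mem_singleton] at hc
    subst hc
    refine ⟨le_refl _, by omega, le_refl _, by omega, ?_⟩
    show (1 : Int) ≤ mget (mset (List.replicate H.toNat (List.replicate W.toNat (-1 : Int))) 0 0 1) 0 0
    rw [mget_mset_self _ 0 0 1 hylt hxlt]
  have hcnt : countNeg (mset (List.replicate H.toNat (List.replicate W.toNat (-1 : Int))) 0 0 1) + 1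
      = countNeg (List.replicate H.toNat (List.replicate W.toNat (-1 : Int))) := by
    apply countNeg_mset _ 0 0 1 hylt hxlt _ (by omega)
    unfold mget
    rw [hrow0, List.getD_eq_getElem?_getD, List.getElem?_replicate, if_pos h0W]
    rfl
  have hrep := countNeg_replicate H.toNat W.toNat
  have hmu : 2 * countNeg (mset (List.replicate H.toNat (List.replicate W.toNat (-1 : Int))) 0 0 1)
      + ([((0 : Int), (0 : Int))] : List (Int × Int)).length
      ≤ 2 * (H.toNat * W.toNat) + 1 := by
    simp only [List.length_singleton]
    omega
  unfold Spec_solve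
  simp only [solve, solve_alt, pyRange_map_const]
  rw [ncells_eq H W S hH hW hlen hrows]
  rw [bfs_eq H W S (2 * (H.toNat * W.toNat) + 1)
    (mset (List.replicate H.toNat (List.replicate W.toNat (-1 : Int))) 0 0 1)
    [((0 : Int), (0 : Int))] hd1 hgood hmu _ _ (le_refl _) (le_refl _)]
  have hfuel : (H * W).toNat = H.toNat * W.toNat := by
    rw [show H = ((H.toNat : Nat) : Int) from (Int.toNat_of_nonneg (by omega)).symm,
      show W = ((W.toNat : Nat) : Int) from (Int.toNat_of_nonneg (by omega)).symm,
      ← Nat.cast_mul, Int.toNat_natCast, Int.toNat_natCast, Int.toNat_natCast]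
  rw [hfuel]
  have hinv0 := InvBF_init H W S hH hW
  have hcnt2 : countNeg (mset (List.replicate H.toNat (List.replicate W.toNat (-1 : Int))) 0 0 1) + 1
      ≤ H.toNat * W.toNat := by omega
  have hmr := match_run H W S hH hW (H.toNat * W.toNat) 0
    (mset (List.replicate H.toNat (List.replicate W.toNat (-1 : Int))) 0 0 1)
    (mset (List.replicate H.toNat (List.replicate W.toNat (H * W + 2 : Int))) 0 0 1)
    [((0 : Int), (0 : Int))] (2 * (H.toNat * W.toNat) + 1) hinv0 hcnt2 (by omega) (by omega)
  have hginb : inb H W ((H - 1 : Int), (W - 1 : Int)) := ⟨by omega, by omega, by omega, by omega⟩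
  obtain ⟨hnegc, hposc⟩ := hmr ((H - 1 : Int), (W - 1 : Int)) hginb
  simp only at hnegc hposc
  by_cases hmk : mget (bfsB H W S (2 * (H.toNat * W.toNat) + 1)
      (mset (List.replicate H.toNat (List.replicate W.toNat (-1 : Int))) 0 0 1)
      [((0 : Int), (0 : Int))]) (H - 1) (W - 1) = -1
  · rw [hmk, hnegc hmk, if_neg (by omega), if_neg (by omega)]
  · obtain ⟨heq, h1v, h2v⟩ := hposc hmk
    rw [heq, if_pos (by omega), if_pos h2v]
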